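-- pv_equiv track=rewrite | github.com/buckeye17/reciteit | app.py | get_unit_breaks
-- ===== SOURCE A (Python) =====
-- def get_unit_breaks(txt, data_store):
--     # capture newline characters as if the user wants to start new units
--     # these newline characters are not kpt in data store,
--     # they are just read where they are from the text
--     newline_ls = txt.split("\n")
--     unit_ls = data_store.copy()
--     if len(newline_ls) > 1:
--         word_ind = 0
--         for line in newline_ls[:-1]:
--             line_word_ls = line.split(" ")
--             word_ind += len(line_word_ls)
--
--             if word_ind not in data_store:
--                 unit_ls.append(word_ind)
--                 unit_ls.sort()
--
--     return unit_ls
-- ===== SOURCE B (Python) =====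
-- def get_unit_breaks(txt, data_store):
--     # Single character scan, no splitting: since len(line.split(" ")) equals
--     # (number of spaces in line) + 1, the cumulative word count at the k-th
--     # newline is (#spaces seen so far) + (#newlines seen so far).  Collect the
--     # unseen counts during the scan and merge with one final sort.
--     known = set(data_store)
--     spaces = newlines = 0
--     new = []
--     for ch in txt:
--         if ch == " ":
--             spaces += 1
--         elif ch == "\n":
--             newlines += 1
--             cand = spaces + newlines
--             if cand not in known:
--                 new.append(cand)
--     if new:
--         return sorted(data_store + new)
--     return list(data_store)
-- ===== Notes on version B (the rewrite author's own statement) =====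
-- stated objective: alternative
-- what changed: B never splits the text into lines or words: a single character scan counts spaces and newlines (the cumulative word count at the k-th newline equals #spaces + #newlines seen so far), collects the unseen counts, and merges with one final sort, replacing A's per-line str.split calls, list-membership scans and append-and-resort of the whole unit list on every line.
import Mathlib
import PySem

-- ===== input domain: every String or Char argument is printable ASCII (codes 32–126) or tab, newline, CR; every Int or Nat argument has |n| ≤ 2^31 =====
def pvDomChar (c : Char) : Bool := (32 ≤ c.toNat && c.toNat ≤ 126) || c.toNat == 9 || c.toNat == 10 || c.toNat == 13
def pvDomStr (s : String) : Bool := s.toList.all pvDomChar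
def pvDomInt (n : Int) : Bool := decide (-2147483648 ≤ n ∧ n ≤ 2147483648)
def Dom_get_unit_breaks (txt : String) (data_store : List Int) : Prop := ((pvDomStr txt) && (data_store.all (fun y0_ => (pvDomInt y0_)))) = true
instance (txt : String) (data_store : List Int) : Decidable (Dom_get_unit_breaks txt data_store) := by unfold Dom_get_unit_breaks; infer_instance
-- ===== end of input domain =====

-- Alternative: B never splits the text — it makes a single character scan counting
-- spaces and newlines (cumulative word count at the k-th newline = #spaces + #newlines
-- seen so far), collects the unseen counts, and merges with one final sort.

-- ===== PORT A =====
def get_unit_breaks (txt : String) (data_store : List Int) : List Int :=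
  let newline_ls := ((PySem.Str.split? txt "\n").getD [])
  let unit_ls := data_store
  if 1 < newline_ls.length then
    ((PySem.List.slice newline_ls none (some (-1))).foldl
      (fun (st : Int × List Int) line =>
        let word_ind := st.1 + ((((PySem.Str.split? line " ").getD [])).length : Int)
        if decide (word_ind ∈ data_store) then (word_ind, st.2)
        else (word_ind, PySem.List.sorted (st.2 ++ [word_ind]) (fun x => x) false))
      (0, unit_ls)).2
  else unit_ls

-- ===== PORT B =====
def get_unit_breaks_alt (txt : String) (data_store : List Int) : List Int :=
  let known := PySem.Set.ofList data_store
  let res := txt.toList.foldl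
    (fun (st : Int × Int × List Int) ch =>
      if ch = ' ' then (st.1 + 1, st.2.1, st.2.2)
      else if ch = '\n' then
        let n := st.2.1 + 1
        let cand := st.1 + n
        (st.1, n, if PySem.Set.contains known cand then st.2.2 else st.2.2 ++ [cand])
      else st)
    ((0 : Int), (0 : Int), ([] : List Int))
  if res.2.2 = [] then data_store
  else PySem.List.sorted (data_store ++ res.2.2) (fun x => x) false

-- ===== PRECONDITION & SPEC =====
def Spec_get_unit_breaks (txt : String) (data_store : List Int) (out : List Int) : Prop := out = get_unit_breaks_alt txt data_store
instance (txt : String) (data_store : List Int) (out : List Int) : Decidable (Spec_get_unit_breaks txt data_store out) := by unfold Spec_get_unit_breaks; infer_instance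

-- ===== CLAIM (what is proved, stated in full; the proofs are below) =====
def Claim_equal_get_unit_breaks : Prop := ∀ (txt : String) (data_store : List Int), Dom_get_unit_breaks txt data_store → Spec_get_unit_breaks txt data_store (get_unit_breaks txt data_store)

-- ===== LEMMAS AND PROOFS =====

-- the merged unit list, as a function of the collected new break values
def pvMerge (data_store news : List Int) : List Int :=
  if news = [] then data_store
  else PySem.List.sorted (data_store ++ news) (fun x => x) false

theorem pvSorted_append_sorted (xs : List Int) (w : Int) :
    PySem.List.sorted (PySem.List.sorted xs (fun x => x) false ++ [w]) (fun x => x) false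
      = PySem.List.sorted (xs ++ [w]) (fun x => x) false := by
  exact PySem.List.sorted_eq_sorted_of_perm _ _ _ (fun a b h => h)
    ((PySem.List.sorted_perm xs (fun x => x) false).append_right [w])

theorem pvMerge_append (data_store news : List Int) (w : Int) :
    PySem.List.sorted (pvMerge data_store news ++ [w]) (fun x => x) false
      = pvMerge data_store (news ++ [w]) := by
  unfold pvMerge
  rcases eq_or_ne news [] with h | h
  · simp [h]
  · simp [h, pvSorted_append_sorted (data_store ++ news) w, List.append_assoc]

-- structural single-character split (proof-side model of Python's str.split(sep))
def pvSplit1 (d : Char) : List Char → List (List Char)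
  | [] => [[]]
  | c :: cs =>
    if c = d then [] :: pvSplit1 d cs
    else
      match pvSplit1 d cs with
      | [] => [[c]]
      | h :: t => (c :: h) :: t

theorem pvSplit1_ne_nil (d : Char) (cs : List Char) : pvSplit1 d cs ≠ [] := by
  cases cs with
  | nil => simp [pvSplit1]
  | cons c cs =>
    simp only [pvSplit1]
    split_ifs
    · simp
    · cases h : pvSplit1 d cs <;> simp

theorem pvSplit1_length (d : Char) (cs : List Char) :
    (pvSplit1 d cs).length = cs.count d + 1 := by
  induction cs with
  | nil => simp [pvSplit1]
  | cons c cs ih =>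
    simp only [pvSplit1]
    by_cases h : c = d
    · simp [h, ih]
    · rcases hs : pvSplit1 d cs with _ | ⟨p, t⟩
      · exact absurd hs (pvSplit1_ne_nil d cs)
      · simp [h, ← ih, hs]

theorem pvGo_eq (d : Char) (fuel : Nat) :
    ∀ (cs cur : List Char) (acc : List (List Char)), cs.length < fuel →
    PySem.Chars.splitOn.go [d] fuel cs cur acc
      = acc.reverse ++
        (match pvSplit1 d cs with
         | [] => []
         | h :: t => (cur.reverse ++ h) :: t) := by
  induction fuel with
  | zero => intro cs cur acc h; omega
  | succ f ih =>
    intro cs cur acc h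
    cases cs with
    | nil => simp [PySem.Chars.splitOn.go, pvSplit1]
    | cons c rest =>
      by_cases hc : c = d
      · subst hc
        rw [PySem.Chars.splitOn.go]
        simp only [List.isPrefixOf, BEq.rfl, Bool.true_and, if_true,
          List.length_cons, List.drop_succ_cons, List.length_nil, List.drop_zero]
        rw [ih rest [] (cur.reverse :: acc) (by simpa using Nat.lt_of_succ_lt_succ h)]
        rcases hs : pvSplit1 c rest with _ | ⟨p, t⟩
        · exact absurd hs (pvSplit1_ne_nil c rest)
        · simp [pvSplit1, hs]
      · rw [PySem.Chars.splitOn.go]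
        simp only [List.isPrefixOf, (by simpa using (Ne.symm hc) : ¬ (d == c) = true),
          Bool.false_and]
        rw [ih rest (c :: cur) acc (by simpa using Nat.lt_of_succ_lt_succ h)]
        rcases hs : pvSplit1 d rest with _ | ⟨p, t⟩
        · exact absurd hs (pvSplit1_ne_nil d rest)
        · simp [pvSplit1, hc, hs]

theorem pvSplitOn_eq (d : Char) (cs : List Char) :
    PySem.Chars.splitOn cs [d] = pvSplit1 d cs := by
  unfold PySem.Chars.splitOn
  rw [pvGo_eq d (cs.length + 1) cs [] [] (by omega)]
  rcases hs : pvSplit1 d cs with _ | ⟨p, t⟩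
  · exact absurd hs (pvSplit1_ne_nil d cs)
  · simp

-- Python str.split? for a one-character separator, on the list side
theorem pvSplit?_eq (s : String) (d : Char) (sep : String) (hsep : sep.toList = [d]) :
    ∃ L : List String, PySem.Str.split? s sep = some L ∧ L.map String.toList = pvSplit1 d s.toList := by
  have h := PySem.Str.split?_map s sep
  rw [hsep] at h
  simp only [PySem.Chars.split?, List.isEmpty, if_false, Bool.false_eq_true] at h
  rcases ho : PySem.Str.split? s sep with _ | L
  · rw [ho] at h; simp at h
  · rw [ho] at h; simp only [Option.map_some, Option.some.injEq] at h
    exact ⟨L, rfl, by rw [h, pvSplitOn_eq]⟩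

-- number of words in a line = number of spaces + 1
theorem pvWords_len (l : String) :
    (((PySem.Str.split? l " ").getD [])).length = l.toList.count ' ' + 1 := by
  rcases pvSplit?_eq l ' ' " " rfl with ⟨L, hL, hmap⟩
  have : L.length = (pvSplit1 ' ' l.toList).length := by rw [← hmap, List.length_map]
  rw [hL]
  simpa [pvSplit1_length] using this

-- space counts of all lines but the last
def pvLineCnt (cs : List Char) : List Nat :=
  ((pvSplit1 '\n' cs).dropLast).map (fun p => p.count ' ')

theorem pvLineCnt_cons (c : Char) (cs : List Char) :
    pvLineCnt (c :: cs) =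
      if c = '\n' then 0 :: pvLineCnt cs
      else if c = ' ' then
        (match pvLineCnt cs with | [] => [] | x :: xs => (x + 1) :: xs)
      else pvLineCnt cs := by
  rcases hs : pvSplit1 '\n' cs with _ | ⟨p, t⟩
  · exact absurd hs (pvSplit1_ne_nil '\n' cs)
  · by_cases hc : c = '\n'
    · subst hc
      simp [pvLineCnt, pvSplit1, hs, List.dropLast_cons_of_ne_nil]
    · rcases ht : t with _ | ⟨q, u⟩
      · subst ht
        by_cases hsp : c = ' ' <;>
          simp [pvLineCnt, pvSplit1, hs, hc, hsp]
      · subst ht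
        by_cases hsp : c = ' ' <;>
          simp [pvLineCnt, pvSplit1, hs, hc, hsp, List.dropLast_cons_of_ne_nil]

-- A's loop, as a function of the per-line space counts
def pvFoldC (ds : List Int) : List Nat → Int → List Int → List Int
  | [], _, u => u
  | k :: ks, w, u =>
    let w' := w + (k : Int) + 1
    pvFoldC ds ks w'
      (if w' ∈ ds then u else PySem.List.sorted (u ++ [w']) (fun x => x) false)

theorem pvFoldC_bump (ds : List Int) (ks : List Nat) (w : Int) (u : List Int) :
    pvFoldC ds (match ks with | [] => [] | x :: xs => (x + 1) :: xs) w u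
      = pvFoldC ds ks (w + 1) u := by
  cases ks with
  | nil => rfl
  | cons x xs =>
    show pvFoldC ds xs (w + ((x + 1 : Nat) : Int) + 1) _ = pvFoldC ds xs (w + 1 + (x : Int) + 1) _
    have h : w + ((x + 1 : Nat) : Int) + 1 = w + 1 + (x : Int) + 1 := by push_cast; ring
    rw [h]

-- B's scan step
def pvStepB (ds : List Int) (st : Int × Int × List Int) (ch : Char) : Int × Int × List Int :=
  if ch = ' ' then (st.1 + 1, st.2.1, st.2.2)
  else if ch = '\n' then
    let n := st.2.1 + 1
    let cand := st.1 + n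
    (st.1, n, if PySem.Set.contains (PySem.Set.ofList ds) cand then st.2.2 else st.2.2 ++ [cand])
  else st

-- the bridge: A's line loop from merged state = merge of B's character scan
theorem pvMain (ds : List Int) (cs : List Char) :
    ∀ (s n : Int) (news : List Int),
    pvFoldC ds (pvLineCnt cs) (s + n) (pvMerge ds news)
      = pvMerge ds (cs.foldl (pvStepB ds) (s, n, news)).2.2 := by
  induction cs with
  | nil => intro s n news; rfl
  | cons c cs ih =>
    intro s n news
    rw [pvLineCnt_cons, List.foldl_cons]
    by_cases hsp : c = ' '
    · subst hsp
      rw [if_neg (by decide), if_pos rfl, pvFoldC_bump]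
      have h : s + n + 1 = (s + 1) + n := by ring
      rw [h, ih (s + 1) n news]
      rfl
    · by_cases hnl : c = '\n'
      · subst hnl
        rw [if_pos rfl]
        have hstep : pvStepB ds (s, n, news) '\n'
            = (s, n + 1, if s + n + 1 ∈ ds then news else news ++ [s + n + 1]) := by
          simp [pvStepB, ← add_assoc]
        rw [hstep]
        show pvFoldC ds (pvLineCnt cs) (s + n + ((0 : Nat) : Int) + 1)
            (if s + n + ((0 : Nat) : Int) + 1 ∈ ds then pvMerge ds news
             else PySem.List.sorted (pvMerge ds news ++ [s + n + ((0 : Nat) : Int) + 1]) (fun x => x) false) = _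
        have harith : s + n + ((0 : Nat) : Int) + 1 = s + n + 1 := by push_cast; ring
        rw [harith]
        by_cases hm : s + n + 1 ∈ ds
        · rw [if_pos hm, if_pos hm]
          have := ih s (n + 1) news
          rw [← add_assoc] at this
          exact this
        · rw [if_neg hm, if_neg hm, pvMerge_append]
          have := ih s (n + 1) (news ++ [s + n + 1])
          rw [← add_assoc] at this
          exact this
      · rw [if_neg hnl, if_neg hsp]
        have hstep : pvStepB ds (s, n, news) c = (s, n, news) := by
          simp [pvStepB, hsp, hnl]
        rw [hstep, ih s n news]

-- A's string-level loop computes pvFoldC of the space counts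
theorem pvAFold_eq (ds : List Int) (ls : List String) :
    ∀ (w : Int) (u : List Int),
    (ls.foldl
      (fun (st : Int × List Int) line =>
        let word_ind := st.1 + ((((PySem.Str.split? line " ").getD [])).length : Int)
        if decide (word_ind ∈ ds) then (word_ind, st.2)
        else (word_ind, PySem.List.sorted (st.2 ++ [word_ind]) (fun x => x) false))
      (w, u)).2
      = pvFoldC ds (ls.map (fun l => l.toList.count ' ')) w u := by
  induction ls with
  | nil => intro w u; rfl
  | cons l ls ih =>
    intro w u
    rw [List.foldl_cons, List.map_cons]
    have hstep : (let word_ind := (w, u).1 + ((((PySem.Str.split? l " ").getD [])).length : Int);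
        if decide (word_ind ∈ ds) then (word_ind, (w, u).2)
        else (word_ind, PySem.List.sorted ((w, u).2 ++ [word_ind]) (fun x => x) false))
        = (w + ((l.toList.count ' ' : Nat) : Int) + 1,
           if w + ((l.toList.count ' ' : Nat) : Int) + 1 ∈ ds then u
           else PySem.List.sorted (u ++ [w + ((l.toList.count ' ' : Nat) : Int) + 1]) (fun x => x) false) := by
      simp only [pvWords_len, decide_eq_true_eq]
      push_cast
      rw [← add_assoc]
      split_ifs <;> rfl
    rw [hstep, ih]
    simp [pvFoldC]

-- if the text has no newline, B's scan collects nothing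
theorem pvNoNewline (ds : List Int) (cs : List Char) (h : '\n' ∉ cs) :
    ∀ (s n : Int) (news : List Int), (cs.foldl (pvStepB ds) (s, n, news)).2.2 = news := by
  induction cs with
  | nil => intro s n news; rfl
  | cons c cs ih =>
    intro s n news
    have hc : c ≠ '\n' := fun hcc => h (hcc ▸ List.mem_cons_self)
    have hrest : '\n' ∉ cs := fun hm => h (List.mem_cons_of_mem c hm)
    rw [List.foldl_cons]
    by_cases hsp : c = ' '
    · subst hsp
      show (cs.foldl (pvStepB ds) (s + 1, n, news)).2.2 = news
      exact ih hrest (s + 1) n news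
    · have hstep : pvStepB ds (s, n, news) c = (s, n, news) := by
        simp [pvStepB, hsp, hc]
      rw [hstep]; exact ih hrest s n news

theorem get_unit_breaks_eq (txt : String) (data_store : List Int) :
    get_unit_breaks txt data_store = get_unit_breaks_alt txt data_store := by
  rcases pvSplit?_eq txt '\n' "\n" rfl with ⟨L, hL, hmap⟩
  have hBmerge : get_unit_breaks_alt txt data_store
      = pvMerge data_store (txt.toList.foldl (pvStepB data_store) (0, 0, [])).2.2 := by
    unfold get_unit_breaks_alt pvMerge pvStepB
    rcases h : (txt.toList.foldl _ ((0 : Int), (0 : Int), ([] : List Int))).2.2 with _ | _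
    all_goals simp_all
  have hLlen : L.length = txt.toList.count '\n' + 1 := by
    have := congrArg List.length hmap
    simpa [pvSplit1_length] using this
  unfold get_unit_breaks
  rw [hL]
  simp only [Option.getD_some, PySem.List.slice_to_neg_one]
  by_cases hgt : 1 < L.length
  · rw [if_pos hgt, pvAFold_eq]
    have hcnt : L.dropLast.map (fun l => l.toList.count ' ') = pvLineCnt txt.toList := by
      unfold pvLineCnt
      rw [← hmap, ← List.map_dropLast, List.map_map]
      rfl
    rw [hcnt]
    have := pvMain data_store txt.toList 0 0 []
    rw [show (0 : Int) + 0 = 0 by ring] at this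
    rw [show pvMerge data_store [] = data_store from rfl] at this
    rw [this, hBmerge]
  · rw [if_neg hgt]
    have hno : '\n' ∉ txt.toList := by
      intro hm
      have : 0 < txt.toList.count '\n' := List.count_pos_iff.mpr hm
      omega
    rw [hBmerge, pvNoNewline data_store txt.toList hno 0 0 []]
    rfl

-- ===== VERDICT (by name: the statement is the Claim_ definition above) =====
theorem get_unit_breaks_spec : Claim_equal_get_unit_breaks := by
  intro txt data_store _
  exact get_unit_breaks_eq txt data_store
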